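-- pv_equiv track=rewrite | github.com/paiml/depyler | examples/hard_wave3_033.py | find_common_substrings
-- ===== SOURCE A (Python) =====
-- from typing import Dict, List, Tuple
--
-- def rolling_hash_windows(text: str, window_size: int) -> List[int]:
--     """Compute rolling hash for all windows of given size."""
--     result: List[int] = []
--     n: int = len(text)
--     if window_size > n or window_size <= 0:
--         return result
--     base: int = 31
--     mod: int = 999999937
--     power: int = 1
--     i: int = 0
--     ws_minus1: int = window_size - 1
--     while i < ws_minus1:
--         power = (power * base) % mod
--         i += 1
--     h: int = 0
--     i = 0
--     while i < window_size:
--         h = (h * base + ord(text[i])) % mod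
--         i += 1
--     result.append(h)
--     i = window_size
--     while i < n:
--         prev_idx: int = i - window_size
--         h = (h - ord(text[prev_idx]) * power % mod + mod) % mod
--         h = (h * base + ord(text[i])) % mod
--         result.append(h)
--         i += 1
--     return result
--
-- def find_common_substrings(text: str, substr_len: int) -> List[int]:
--     """Find positions where substrings of given length repeat."""
--     hashes: List[int] = rolling_hash_windows(text, substr_len)
--     seen: Dict[int, int] = {}
--     result: List[int] = []
--     i: int = 0
--     while i < len(hashes):
--         h: int = hashes[i]
--         if h in seen:
--             result.append(i)
--         else:
--             seen[h] = i
--         i += 1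
--     return result
-- ===== SOURCE B (Python) =====
-- def find_common_substrings(text: str, substr_len: int) -> list:
--     """Find positions where substrings of given length repeat."""
--     n = len(text)
--     result = []
--     if substr_len <= 0 or substr_len > n:
--         return result
--     mod = 999999937
--     seen = {}
--     for i in range(n - substr_len + 1):
--         h = 0
--         for j in range(substr_len):
--             h = (h * 31 + ord(text[i + j])) % mod
--         if h in seen:
--             result.append(i)
--         else:
--             seen[h] = i
--     return result
-- ===== Notes on version B (the rewrite author's own statement) =====
-- stated objective: simpler
-- what changed: Replaced the rolling-hash helper (precomputed power, incremental subtract/shift update across windows) by a single inlined loop that recomputes each window's polynomial hash directly with the same base 31 and modulus 999999937, feeding the same first-seen dict scan.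
import Mathlib
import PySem

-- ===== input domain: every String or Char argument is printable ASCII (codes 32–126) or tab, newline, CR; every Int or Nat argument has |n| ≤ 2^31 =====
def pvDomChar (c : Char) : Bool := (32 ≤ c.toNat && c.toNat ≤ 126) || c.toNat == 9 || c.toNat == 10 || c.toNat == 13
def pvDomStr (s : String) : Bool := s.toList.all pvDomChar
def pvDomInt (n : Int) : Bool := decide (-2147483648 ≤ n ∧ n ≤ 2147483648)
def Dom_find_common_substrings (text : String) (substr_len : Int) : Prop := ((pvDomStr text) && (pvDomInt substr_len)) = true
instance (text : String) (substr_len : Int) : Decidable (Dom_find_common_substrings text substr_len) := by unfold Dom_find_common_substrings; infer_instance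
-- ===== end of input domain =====

-- B replaces A's rolling-hash helper by an inlined single loop that recomputes each
-- window's polynomial hash directly (same base 31 and modulus); objective: simpler.

-- ===== PORT A =====
-- ord(text[idx]) on an in-range index (used by both Pythons via ord(text[...]))
def fcsOrd (cs : List Char) (i : Int) : Int := ((PySem.List.pyGetD cs i ' ').toNat : Int)

-- while i < ws_minus1: power = (power * base) % mod  (fuel = remaining iterations)
def fcsA_powGo : Nat → Int → Int → Int
  | 0, _, power => power
  | fuel + 1, i, power => fcsA_powGo fuel (i + 1) (PySem.Int.mod (power * 31) 999999937)

def fcsA_pow (bound i power : Int) : Int := fcsA_powGo (bound - i).toNat i power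

-- while i < window_size: h = (h * base + ord(text[i])) % mod  (fuel = remaining iterations)
def fcsA_initGo (cs : List Char) : Nat → Int → Int → Int
  | 0, _, h => h
  | fuel + 1, i, h => fcsA_initGo cs fuel (i + 1) (PySem.Int.mod (h * 31 + fcsOrd cs i) 999999937)

def fcsA_init (cs : List Char) (w i h : Int) : Int := fcsA_initGo cs (w - i).toNat i h

-- while i < n: the rolling update, appending each window hash  (fuel = remaining iterations)
def fcsA_mainGo (cs : List Char) (w power : Int) : Nat → Int → Int → List Int → List Int
  | 0, _, _, result => result
  | fuel + 1, i, h, result =>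
    let h1 := PySem.Int.mod (h - PySem.Int.mod (fcsOrd cs (i - w) * power) 999999937 + 999999937) 999999937
    let h2 := PySem.Int.mod (h1 * 31 + fcsOrd cs i) 999999937
    fcsA_mainGo cs w power fuel (i + 1) h2 (result ++ [h2])

def fcsA_main (cs : List Char) (n w power i h : Int) (result : List Int) : List Int :=
  fcsA_mainGo cs w power (n - i).toNat i h result

def rolling_hash_windows (text : String) (window_size : Int) : List Int :=
  let cs := text.toList
  let n : Int := (cs.length : Int)
  if window_size > n ∨ window_size ≤ 0 then []
  else
    let power := fcsA_pow (window_size - 1) 0 1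
    let h := fcsA_init cs window_size 0 0
    fcsA_main cs n window_size power window_size h [h]

-- while i < len(hashes): the seen-dict scan  (fuel = remaining iterations)
def fcsA_scanGo (hashes : List Int) : Nat → Int → PySem.Dict Int Int → List Int → List Int
  | 0, _, _, result => result
  | fuel + 1, i, seen, result =>
    let h := PySem.List.pyGetD hashes i 0
    if PySem.Dict.contains seen h then fcsA_scanGo hashes fuel (i + 1) seen (result ++ [i])
    else fcsA_scanGo hashes fuel (i + 1) (PySem.Dict.insert seen h i) result

def fcsA_scan (hashes : List Int) (i : Int) (seen : PySem.Dict Int Int) (result : List Int) : List Int :=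
  fcsA_scanGo hashes ((hashes.length : Int) - i).toNat i seen result

def find_common_substrings (text : String) (substr_len : Int) : List Int :=
  let hashes := rolling_hash_windows text substr_len
  fcsA_scan hashes 0 PySem.Dict.empty []

-- ===== PORT B =====
-- direct per-window hash: fold h = (h*31 + ord(text[i+j])) % mod over j in range(substr_len)
def fcsB_hash (cs : List Char) (i w : Int) : Int :=
  (PySem.List.pyRange 0 w 1).foldl
    (fun h j => PySem.Int.mod (h * 31 + fcsOrd cs (i + j)) 999999937) 0

def find_common_substrings_alt (text : String) (substr_len : Int) : List Int :=
  let cs := text.toList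
  let n : Int := (cs.length : Int)
  if substr_len ≤ 0 ∨ substr_len > n then []
  else
    ((PySem.List.pyRange 0 (n - substr_len + 1) 1).foldl
      (fun st i =>
        let h := fcsB_hash cs i substr_len
        if PySem.Dict.contains st.2 h then (st.1 ++ [i], st.2)
        else (st.1, PySem.Dict.insert st.2 h i))
      (([] : List Int), (PySem.Dict.empty : PySem.Dict Int Int))).1

-- ===== PRECONDITION & SPEC =====
def Spec_find_common_substrings (text : String) (substr_len : Int) (out : List Int) : Prop := out = find_common_substrings_alt text substr_len
instance (text : String) (substr_len : Int) (out : List Int) : Decidable (Spec_find_common_substrings text substr_len out) := by unfold Spec_find_common_substrings; infer_instance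

-- ===== CLAIM (what is proved, stated in full; the proofs are below) =====
def Claim_equal_find_common_substrings : Prop := ∀ (text : String) (substr_len : Int), Dom_find_common_substrings text substr_len → Spec_find_common_substrings text substr_len (find_common_substrings text substr_len)

-- ===== LEMMAS AND PROOFS =====

-- pure polynomial fold (no modulus) and the modular fold both programs use
def fcsG (h : Int) (l : List Char) : Int := l.foldl (fun h c => h * 31 + (c.toNat : Int)) h
def fcsF (h : Int) (l : List Char) : Int := l.foldl (fun h c => (h * 31 + (c.toNat : Int)) % 999999937) h
-- hash of the window of length W starting at s
def fcsWH (cs : List Char) (W s : Nat) : Int := fcsF 0 ((cs.drop s).take W)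

-- common shape of both dedup scans
def fcsSpecScan : List (Int × Int) → PySem.Dict Int Int → List Int → List Int
  | [], _, res => res
  | p :: rest, seen, res =>
    if PySem.Dict.contains seen p.2 then fcsSpecScan rest seen (res ++ [p.1])
    else fcsSpecScan rest (PySem.Dict.insert seen p.2 p.1) res

lemma fcsPm (a : Int) : PySem.Int.mod a 999999937 = a % 999999937 :=
  PySem.Int.mod_eq_emod_of_pos (by norm_num)

lemma fcsMSelf (x : Int) : x % 999999937 ≡ x [ZMOD 999999937] :=
  Int.emod_emod_of_dvd x dvd_rfl

lemma fcsOrd_nat (cs : List Char) (I : Nat) (h : I < cs.length) :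
    fcsOrd cs (I : Int) = (cs[I].toNat : Int) := by
  simp [fcsOrd, PySem.List.pyGetD_natCast, List.getD_eq_getElem?_getD, List.getElem?_eq_getElem h]

lemma fcsG_shift (h : Int) (l : List Char) : fcsG h l = h * 31 ^ l.length + fcsG 0 l := by
  induction l generalizing h with
  | nil => simp [fcsG]
  | cons c l ih =>
    show fcsG (h * 31 + (c.toNat : Int)) l = _
    rw [ih]
    have h2 : fcsG 0 (c :: l) = (c.toNat : Int) * 31 ^ l.length + fcsG 0 l := by
      show fcsG ((0:Int) * 31 + (c.toNat : Int)) l = _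
      rw [ih]; ring_nf
    rw [h2]
    simp only [List.length_cons, pow_succ]; ring

lemma fcsG_congr {a b : Int} (l : List Char) (hab : a ≡ b [ZMOD 999999937]) :
    fcsG a l ≡ fcsG b l [ZMOD 999999937] := by
  rw [fcsG_shift a l, fcsG_shift b l]
  exact (hab.mul_right _).add_right _

lemma fcsFG (h : Int) (l : List Char) : fcsF h l ≡ fcsG h l [ZMOD 999999937] := by
  induction l generalizing h with
  | nil => rfl
  | cons c l ih =>
    show fcsF ((h * 31 + _) % 999999937) l ≡ fcsG (h * 31 + _) l [ZMOD 999999937]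
    exact (ih _).trans (fcsG_congr l (fcsMSelf _))

lemma fcsF_append_singleton (h : Int) (l : List Char) (c : Char) :
    fcsF h (l ++ [c]) = (fcsF h l * 31 + (c.toNat : Int)) % 999999937 := by
  simp [fcsF, List.foldl_append]

lemma fcsG_append_singleton (h : Int) (l : List Char) (c : Char) :
    fcsG h (l ++ [c]) = fcsG h l * 31 + (c.toNat : Int) := by
  simp [fcsG, List.foldl_append]

lemma fcsF_reduced (h : Int) (l : List Char) (hne : l ≠ []) :
    fcsF h l % 999999937 = fcsF h l := by
  induction l generalizing h with
  | nil => exact absurd rfl hne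
  | cons c l ih =>
    show fcsF ((h * 31 + _) % 999999937) l % 999999937 = fcsF ((h * 31 + _) % 999999937) l
    rcases l with _ | ⟨d, l⟩
    · exact Int.emod_emod_of_dvd _ dvd_rfl
    · exact ih _ (by simp)

lemma fcsA_powGo_mod : ∀ (k : Nat) (i p : Int),
    fcsA_powGo k i p ≡ p * 31 ^ k [ZMOD 999999937] := by
  intro k
  induction k with
  | zero => intro i p; simp [fcsA_powGo]
  | succ k ih =>
    intro i p
    rw [fcsA_powGo, fcsPm]
    have h1 := ih (i + 1) (p * 31 % 999999937)
    refine h1.trans ?_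
    have : (p * 31 % 999999937) * 31 ^ k ≡ (p * 31) * 31 ^ k [ZMOD 999999937] :=
      (fcsMSelf _).mul_right _
    refine this.trans ?_
    rw [pow_succ]; ring_nf; exact Int.ModEq.rfl

lemma fcsA_pow_mod : ∀ (k : Nat) (b i p : Int), (b - i).toNat = k →
    fcsA_pow b i p ≡ p * 31 ^ k [ZMOD 999999937] := by
  intro k b i p hk
  rw [fcsA_pow, hk]
  exact fcsA_powGo_mod k i p

lemma fcsA_initGo_eq (cs : List Char) (W : Nat) (hW : W ≤ cs.length) :
    ∀ (k I : Nat) (h : Int), I + k = W →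
    fcsA_initGo cs k (I : Int) h = fcsF h ((cs.take W).drop I) := by
  intro k
  induction k with
  | zero =>
    intro I h hk
    rw [fcsA_initGo]
    rw [List.drop_of_length_le (by simp; omega)]
    rfl
  | succ k ih =>
    intro I h hk
    have hIN : I < cs.length := by omega
    rw [fcsA_initGo, fcsPm, fcsOrd_nat cs I hIN]
    have hIt : I < (cs.take W).length := by simp; omega
    rw [List.drop_eq_getElem_cons hIt]
    have hget : (cs.take W)[I] = cs[I] := List.getElem_take
    rw [hget]
    show fcsA_initGo cs k ((I : Int) + 1) _
        = fcsF ((h * 31 + (cs[I].toNat : Int)) % 999999937) ((cs.take W).drop (I + 1))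
    have := ih (I + 1) ((h * 31 + (cs[I].toNat : Int)) % 999999937) (by omega)
    rw [← this]
    norm_cast

lemma fcsA_init_eq (cs : List Char) (W : Nat) (hW : W ≤ cs.length) :
    ∀ (k I : Nat) (h : Int), I + k = W →
    fcsA_init cs (W : Int) (I : Int) h = fcsF h ((cs.take W).drop I) := by
  intro k I h hk
  rw [fcsA_init, show (((W : Nat) : Int) - (I : Int)).toNat = k by omega]
  exact fcsA_initGo_eq cs W hW k I h hk

-- the rolling update maps the hash of window s to the hash of window s+1
lemma fcsRoll (cs : List Char) (V s : Nat) (power : Int)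
    (hs : s + (V + 1) < cs.length)
    (hpow : power ≡ 31 ^ V [ZMOD 999999937]) :
    ((fcsWH cs (V + 1) s - (fcsOrd cs (s : Int) * power) % 999999937 + 999999937) % 999999937
        * 31 + fcsOrd cs (((s + 1 + V : Nat) : Int))) % 999999937
      = fcsWH cs (V + 1) (s + 1) := by
  have hsN : s < cs.length := by omega
  have hs1N : s + 1 + V < cs.length := by omega
  set mid := (cs.drop (s + 1)).take V with hmid
  have hmidlen : mid.length = V := by simp [hmid]; omega
  have hwin_s : (cs.drop s).take (V + 1) = cs[s] :: mid := by
    rw [List.drop_eq_getElem_cons hsN, List.take_succ_cons]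
  have hwin_s1 : (cs.drop (s + 1)).take (V + 1) = mid ++ [cs[s + 1 + V]] := by
    rw [List.take_add_one, hmid]
    congr 1
    rw [List.getElem?_drop, List.getElem?_eq_getElem hs1N]
    rfl
  have hc0 : fcsOrd cs (s : Int) = (cs[s].toNat : Int) := fcsOrd_nat cs s hsN
  have hcI : fcsOrd cs (((s + 1 + V : Nat) : Int)) = (cs[s + 1 + V].toNat : Int) :=
    fcsOrd_nat cs (s + 1 + V) hs1N
  set c0 : Int := (cs[s].toNat : Int)
  set cI : Int := (cs[s + 1 + V].toNat : Int)
  rw [hc0, hcI]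
  have h1 : fcsWH cs (V + 1) s ≡ c0 * 31 ^ V + fcsG 0 mid [ZMOD 999999937] := by
    unfold fcsWH
    rw [hwin_s]
    refine (fcsFG _ _).trans ?_
    show fcsG ((0:Int) * 31 + c0) mid ≡ _ [ZMOD 999999937]
    rw [fcsG_shift, hmidlen]
    ring_nf; exact Int.ModEq.rfl
  have h2 : (c0 * power) % 999999937 ≡ c0 * 31 ^ V [ZMOD 999999937] :=
    (fcsMSelf _).trans (hpow.mul_left c0)
  have hm0 : (999999937 : Int) ≡ 0 [ZMOD 999999937] := by decide
  have h3 : fcsWH cs (V + 1) s - (c0 * power) % 999999937 + 999999937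
      ≡ fcsG 0 mid [ZMOD 999999937] := by
    have := (h1.sub h2).add hm0
    have he : c0 * 31 ^ V + fcsG 0 mid - c0 * 31 ^ V + 0 = fcsG 0 mid := by ring
    rwa [he] at this
  have h4 : (fcsWH cs (V + 1) s - (c0 * power) % 999999937 + 999999937) % 999999937 * 31 + cI
      ≡ fcsG 0 mid * 31 + cI [ZMOD 999999937] :=
    (((fcsMSelf _).trans h3).mul_right 31).add_right cI
  have h5 : fcsG 0 mid * 31 + cI = fcsG 0 (mid ++ [cs[s + 1 + V]]) :=
    (fcsG_append_singleton 0 mid _).symm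
  have h6 : fcsG 0 (mid ++ [cs[s + 1 + V]]) ≡ fcsF 0 (mid ++ [cs[s + 1 + V]]) [ZMOD 999999937] :=
    (fcsFG _ _).symm
  have hfin : (fcsWH cs (V + 1) s - (c0 * power) % 999999937 + 999999937) % 999999937 * 31 + cI
      ≡ fcsF 0 (mid ++ [cs[s + 1 + V]]) [ZMOD 999999937] := (h4.trans (h5 ▸ h6))
  have : fcsWH cs (V + 1) (s + 1) = fcsF 0 (mid ++ [cs[s + 1 + V]]) := by
    unfold fcsWH; rw [hwin_s1]
  rw [this, ← fcsF_reduced 0 (mid ++ [cs[s + 1 + V]]) (by simp)]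
  exact hfin

lemma fcsRangeMapSucc {α : Type} (g : Nat → α) (k : Nat) :
    (List.range (k + 1)).map g = g 0 :: (List.range k).map (fun j => g (j + 1)) := by
  rw [List.range_succ_eq_map, List.map_cons, List.map_map]
  rfl

lemma fcsA_main_eq (cs : List Char) (V : Nat) (power : Int)
    (hpow : power ≡ 31 ^ V [ZMOD 999999937]) :
    ∀ (k s : Nat) (res : List Int), s + (V + 1) + k ≤ cs.length →
    fcsA_mainGo cs ((V + 1 : Nat) : Int) power k ((s + (V + 1) : Nat) : Int)
        (fcsWH cs (V + 1) s) res
      = res ++ (List.range k).map (fun j => fcsWH cs (V + 1) (s + 1 + j)) := by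
  intro k
  induction k with
  | zero =>
    intro s res hk
    rw [fcsA_mainGo]
    simp
  | succ k ih =>
    intro s res hk
    rw [fcsA_mainGo]
    simp only [fcsPm]
    have hidx1 : ((s + (V + 1) : Nat) : Int) - ((V + 1 : Nat) : Int) = (s : Int) := by
      push_cast; ring
    rw [hidx1]
    have hidx2 : ((s + (V + 1) : Nat) : Int) = ((s + 1 + V : Nat) : Int) := by congr 1; omega
    rw [hidx2]
    rw [fcsRoll cs V s power (by omega) hpow]
    have hidx3 : ((s + 1 + V : Nat) : Int) + 1 = ((s + 1 + (V + 1) : Nat) : Int) := by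
      push_cast; ring
    rw [hidx3, ih (s + 1) (res ++ [fcsWH cs (V + 1) (s + 1)]) (by omega)]
    rw [fcsRangeMapSucc (fun j => fcsWH cs (V + 1) (s + 1 + j)) k]
    simp only [List.append_assoc, List.cons_append]
    congr 2
    apply List.map_congr_left
    intro j _
    have : s + 1 + 1 + j = s + 1 + (j + 1) := by omega
    rw [this]

lemma fcsA_scanGo_eq (hashes : List Int) : ∀ (k I : Nat) (seen : PySem.Dict Int Int) (res : List Int),
    fcsA_scanGo hashes k (I : Int) seen res
      = fcsSpecScan ((List.range k).map (fun j => (((I + j : Nat) : Int), hashes.getD (I + j) 0))) seen res := by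
  intro k
  induction k with
  | zero =>
    intro I seen res
    rw [fcsA_scanGo]
    simp [fcsSpecScan]
  | succ k ih =>
    intro I seen res
    rw [fcsA_scanGo]
    simp only [PySem.List.pyGetD_natCast]
    rw [fcsRangeMapSucc (fun j => (((I + j : Nat) : Int), hashes.getD (I + j) 0)) k]
    simp only [fcsSpecScan, Nat.add_zero]
    have hshift : ∀ (seen' : PySem.Dict Int Int) (res' : List Int),
        fcsSpecScan ((List.range k).map (fun j => (((I + 1 + j : Nat) : Int), hashes.getD (I + 1 + j) 0))) seen' res'
          = fcsSpecScan ((List.range k).map (fun j => (((I + (j + 1) : Nat) : Int), hashes.getD (I + (j + 1)) 0))) seen' res' := by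
      intro seen' res'
      congr 1
      apply List.map_congr_left
      intro j _
      have : I + 1 + j = I + (j + 1) := by omega
      rw [this]
    by_cases hc : PySem.Dict.contains seen (hashes.getD I 0) = true
    · rw [if_pos hc, if_pos hc]
      have hcast : (I : Int) + 1 = ((I + 1 : Nat) : Int) := by omega
      rw [hcast, ih (I + 1) seen (res ++ [((I : Nat) : Int)]), hshift]
    · rw [if_neg hc, if_neg hc]
      have hcast : (I : Int) + 1 = ((I + 1 : Nat) : Int) := by omega
      rw [hcast, ih (I + 1) _ res, hshift]

lemma fcsA_scan_eq (hashes : List Int) (k I : Nat) (seen : PySem.Dict Int Int) (res : List Int)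
    (hk : I + k = hashes.length) :
    fcsA_scan hashes (I : Int) seen res
      = fcsSpecScan ((List.range k).map (fun j => (((I + j : Nat) : Int), hashes.getD (I + j) 0))) seen res := by
  rw [fcsA_scan, show (((hashes.length : Nat) : Int) - (I : Int)).toNat = k by omega]
  exact fcsA_scanGo_eq hashes k I seen res

lemma fcsB_fold_eq (cs : List Char) (w : Int) :
    ∀ (idxs : List Int) (seen : PySem.Dict Int Int) (res : List Int),
    (idxs.foldl
      (fun st i =>
        let h := fcsB_hash cs i w
        if PySem.Dict.contains st.2 h then (st.1 ++ [i], st.2)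
        else (st.1, PySem.Dict.insert st.2 h i)) (res, seen)).1
    = fcsSpecScan (idxs.map (fun i => (i, fcsB_hash cs i w))) seen res := by
  intro idxs
  induction idxs with
  | nil => intro seen res; simp [fcsSpecScan]
  | cons i idxs ih =>
    intro seen res
    simp only [List.foldl_cons, List.map_cons, fcsSpecScan]
    by_cases hc : PySem.Dict.contains seen (fcsB_hash cs i w) = true
    · simp only [hc, if_true]
      exact ih seen (res ++ [i])
    · simp only [hc, Bool.false_eq_true, if_false]
      exact ih _ res

lemma fcsPyRangeNat (M : Nat) :
    PySem.List.pyRange 0 (M : Int) 1 = (List.range M).map (fun k => ((k : Nat) : Int)) := by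
  rw [PySem.List.pyRange_one]
  simp

lemma fcsB_hash_eq (cs : List Char) (I : Nat) : ∀ (W : Nat), I + W ≤ cs.length →
    fcsB_hash cs (I : Int) (W : Int) = fcsWH cs W I := by
  intro W
  induction W with
  | zero =>
    intro _
    rw [fcsB_hash, fcsPyRangeNat]
    simp [fcsWH, fcsF]
  | succ W ihW =>
    intro hle
    have ihW' := ihW (by omega)
    rw [fcsB_hash, fcsPyRangeNat] at ihW'
    rw [fcsB_hash, fcsPyRangeNat, List.range_succ, List.map_append, List.foldl_append, ihW']
    simp only [List.map_cons, List.map_nil, List.foldl_cons, List.foldl_nil, fcsPm]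
    have hIW : I + W < cs.length := by omega
    have hidx : (I : Int) + ((W : Nat) : Int) = ((I + W : Nat) : Int) := by push_cast; ring
    rw [hidx, fcsOrd_nat cs (I + W) hIW]
    show _ = fcsF 0 ((cs.drop I).take (W + 1))
    rw [List.take_add_one]
    have hget : (cs.drop I)[W]? = some cs[I + W] := by
      rw [List.getElem?_drop, List.getElem?_eq_getElem hIW]
    rw [hget]
    show _ = fcsF 0 ((cs.drop I).take W ++ [cs[I + W]])
    rw [fcsF_append_singleton]
    rfl

lemma fcsRHW_eq (text : String) (W : Nat) (h1 : 1 ≤ W) (hW : W ≤ text.toList.length) :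
    rolling_hash_windows text ((W : Nat) : Int)
      = (List.range (text.toList.length - W + 1)).map (fun s => fcsWH text.toList W s) := by
  obtain ⟨V, rfl⟩ : ∃ V, W = V + 1 := ⟨W - 1, by omega⟩
  rw [rolling_hash_windows]
  simp only []
  rw [if_neg (by push_cast; omega)]
  have hpow : fcsA_pow (((V + 1 : Nat) : Int) - 1) 0 1 ≡ 31 ^ V [ZMOD 999999937] := by
    have := fcsA_pow_mod V (((V + 1 : Nat) : Int) - 1) 0 1 (by push_cast; omega)
    simpa using this
  have hinit : fcsA_init text.toList ((V + 1 : Nat) : Int) 0 0 = fcsWH text.toList (V + 1) 0 := by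
    have h0 := fcsA_init_eq text.toList (V + 1) hW (V + 1) 0 0 (by omega)
    rw [show ((0 : Nat) : Int) = (0 : Int) by simp, List.drop_zero] at h0
    rw [h0, fcsWH, List.drop_zero]
  rw [hinit]
  have hmain := fcsA_main_eq text.toList V (fcsA_pow (((V + 1 : Nat) : Int) - 1) 0 1) hpow
    (text.toList.length - (V + 1)) 0 [fcsWH text.toList (V + 1) 0] (by omega)
  rw [show ((0 + (V + 1) : Nat) : Int) = ((V + 1 : Nat) : Int) by simp] at hmain
  rw [fcsA_main, show (((text.toList.length : Nat) : Int) - ((V + 1 : Nat) : Int)).toNat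
      = text.toList.length - (V + 1) by omega]
  rw [hmain]
  rw [fcsRangeMapSucc (fun s => fcsWH text.toList (V + 1) s) (text.toList.length - (V + 1))]
  simp only [List.cons_append, List.nil_append]
  congr 1
  apply List.map_congr_left
  intro j _
  have : 0 + 1 + j = j + 1 := by omega
  rw [this]

-- ===== VERDICT (by name: the statement is the Claim_ definition above) =====
theorem find_common_substrings_spec : Claim_equal_find_common_substrings := by
  intro text substr_len _hdom
  unfold Spec_find_common_substrings
  by_cases hbad : substr_len ≤ 0 ∨ substr_len > ((text.toList.length : Nat) : Int)
  · rw [find_common_substrings, find_common_substrings_alt, rolling_hash_windows]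
    simp only []
    rw [if_pos (by tauto), if_pos hbad]
    rw [fcsA_scan]
    simp [fcsA_scanGo]
  · rw [not_or] at hbad
    obtain ⟨hpos, hle⟩ := hbad
    obtain ⟨W, rfl⟩ : ∃ W : Nat, substr_len = ((W : Nat) : Int) :=
      ⟨substr_len.toNat, by omega⟩
    have h1W : 1 ≤ W := by omega
    have hWN : W ≤ text.toList.length := by omega
    have hashesK : ((List.range (text.toList.length - W + 1)).map
        (fun s => fcsWH text.toList W s)).length = text.toList.length - W + 1 := by simp
    -- A side
    rw [find_common_substrings, fcsRHW_eq text W h1W hWN]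
    rw [show (0 : Int) = ((0 : Nat) : Int) by simp]
    rw [fcsA_scan_eq ((List.range (text.toList.length - W + 1)).map
        (fun s => fcsWH text.toList W s)) (text.toList.length - W + 1) 0 PySem.Dict.empty []
      (by rw [hashesK]; omega)]
    -- B side
    rw [find_common_substrings_alt]
    simp only []
    rw [if_neg (by omega)]
    have hKcast : ((text.toList.length : Int) - ((W : Nat) : Int) + 1)
        = ((text.toList.length - W + 1 : Nat) : Int) := by push_cast; omega
    rw [hKcast, fcsPyRangeNat (text.toList.length - W + 1),
      fcsB_fold_eq text.toList ((W : Nat) : Int), List.map_map]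
    congr 1
    apply List.map_congr_left
    intro j hj
    have hjK : j < text.toList.length - W + 1 := List.mem_range.mp hj
    have hgetD : ((List.range (text.toList.length - W + 1)).map
        (fun s => fcsWH text.toList W s)).getD j 0 = fcsWH text.toList W j := by
      rw [List.getD_eq_getElem?_getD, List.getElem?_map, List.getElem?_range hjK]
      simp
    have hbh : fcsB_hash text.toList ((j : Nat) : Int) ((W : Nat) : Int) = fcsWH text.toList W j :=
      fcsB_hash_eq text.toList j W (by omega)
    simp only [Function.comp_apply, Nat.zero_add]
    rw [hgetD, hbh]
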